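-- pv_equiv track=rewrite | github.com/rayenth/my_work | search.py | collect_and_fill
-- ===== SOURCE A (Python) =====
-- def collect_and_fill(listOfData,dic) :
--         dicc={}
--         for spec in listOfData :
--             for bglst in dic.values():
--                     for pref in bglst[0]:
--
--                         if pref in spec:
--                             bglst[1][len(bglst[1])-1]=spec
--                             break
--         dicc=dic
--         return dicc
-- ===== SOURCE B (Python) =====
-- def collect_and_fill(listOfData, dic):
--     # Group-outer traversal: for each group, scan the specs once from the end
--     # and stop at the first spec containing any of the group's prefixes.
--     for bglst in dic.values():
--         for spec in reversed(listOfData):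
--             if any(pref in spec for pref in bglst[0]):
--                 bglst[1][len(bglst[1]) - 1] = spec
--                 break
--     return dic
-- ===== Notes on version B (the rewrite author's own statement) =====
-- stated objective: faster
-- what changed: B swaps the loop nesting: instead of scanning every spec and rewriting each matching group's last slot over and over, B scans the specs once per group from the end and stops at the first (i.e. last) matching spec, writing each group's slot at most once.
import Mathlib
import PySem

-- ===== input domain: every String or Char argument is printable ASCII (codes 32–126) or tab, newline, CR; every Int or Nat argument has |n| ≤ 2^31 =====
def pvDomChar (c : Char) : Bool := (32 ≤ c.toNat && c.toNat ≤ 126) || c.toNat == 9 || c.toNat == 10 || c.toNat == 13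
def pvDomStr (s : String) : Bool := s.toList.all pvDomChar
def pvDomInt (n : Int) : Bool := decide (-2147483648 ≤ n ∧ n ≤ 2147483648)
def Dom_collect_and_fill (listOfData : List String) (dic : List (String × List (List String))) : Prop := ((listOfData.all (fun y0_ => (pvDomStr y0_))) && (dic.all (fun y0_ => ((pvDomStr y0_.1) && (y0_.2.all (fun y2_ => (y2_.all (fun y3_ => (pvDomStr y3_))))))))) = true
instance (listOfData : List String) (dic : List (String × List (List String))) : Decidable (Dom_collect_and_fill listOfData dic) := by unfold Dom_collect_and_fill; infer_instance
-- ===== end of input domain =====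

-- B swaps the loop nesting of A: one reversed scan of the specs per group, stopping at the
-- first (= last) matching spec, instead of rewriting each group's last slot for every spec.
-- Both A and B mutate `dic` in place in Python and return it; the equivalence proved here is
-- about the returned value.


-- ===== PORT A =====
-- shared helper (both Pythons perform the same statement `bglst[1][len(bglst[1])-1] = spec`);
-- Python raises IndexError when bglst has no index 1 (pyGet? = none) or bglst[1] is empty
-- (assignment at index -1 of []); both cases are excluded by Pre_ and left unchanged here.
def pvAssign (spec : String) (bglst : List (List String)) : List (List String) :=
  match PySem.List.pyGet? bglst 1 with
  | some l1 => bglst.set 1 (l1.set (l1.length - 1) spec)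
  | none => bglst

-- `for pref in bglst[0]: if pref in spec: …; break` — the first matching prefix
def pvMatchA (spec : String) (bglst : List (List String)) : Option String :=
  ((PySem.List.pyGet? bglst 0).getD []).find? (fun pref => PySem.Str.isIn pref spec)

def collect_and_fill (listOfData : List String) (dic : List (String × List (List String))) : List (String × List (List String)) :=
  listOfData.foldl
    (fun d spec =>
      d.map (fun kv =>
        match pvMatchA spec kv.2 with
        | some _ => (kv.1, pvAssign spec kv.2)
        | none => kv))
    dic

-- ===== PORT B =====
def collect_and_fill_alt (listOfData : List String) (dic : List (String × List (List String))) : List (String × List (List String)) :=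
  dic.map (fun kv =>
    match listOfData.reverse.find?
        (fun spec => ((PySem.List.pyGet? kv.2 0).getD []).any (fun pref => PySem.Str.isIn pref spec)) with
    | some spec => (kv.1, pvAssign spec kv.2)
    | none => kv)

-- ===== PRECONDITION & SPEC =====
-- Pre_ excludes exactly (a) association lists with duplicate keys, which no Python dict
-- argument can represent, and (b) inputs on which A raises IndexError: a group whose value
-- list is empty while there are specs, or a group that some spec matches but whose value
-- list has no second element or an empty second element (bglst[1][-1] on []).
def Pre_collect_and_fill (listOfData : List String) (dic : List (String × List (List String))) : Prop :=
  (dic.map Prod.fst).Nodup ∧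
  ∀ kv ∈ dic,
    (listOfData ≠ [] → kv.2 ≠ []) ∧
    ((∃ spec ∈ listOfData, ∃ pref ∈ kv.2.headD [], PySem.Str.isIn pref spec = true) →
      2 ≤ kv.2.length ∧ kv.2.getD 1 [] ≠ [])
instance (listOfData : List String) (dic : List (String × List (List String))) : Decidable (Pre_collect_and_fill listOfData dic) := by unfold Pre_collect_and_fill; infer_instance
def pvWitness_collect_and_fill : List String × (List (String × List (List String))) :=
  (["ab", "cd"], [("k", [["a"], ["x"]]), ("m", [["q"], ["y", "z"]])])

def Spec_collect_and_fill (listOfData : List String) (dic : List (String × List (List String))) (out : List (String × List (List String))) : Prop := out = collect_and_fill_alt listOfData dic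
instance (listOfData : List String) (dic : List (String × List (List String))) (out : List (String × List (List String))) : Decidable (Spec_collect_and_fill listOfData dic out) := by unfold Spec_collect_and_fill; infer_instance

-- ===== CLAIM (what is proved, stated in full; the proofs are below) =====
def Claim_equal_collect_and_fill : Prop := ∀ (listOfData : List String) (dic : List (String × List (List String))), Dom_collect_and_fill listOfData dic → Pre_collect_and_fill listOfData dic → Spec_collect_and_fill listOfData dic (collect_and_fill listOfData dic)

-- ===== LEMMAS AND PROOFS =====

-- the Boolean "some prefix of the group matches spec"
def pvM (bglst : List (List String)) (spec : String) : Bool :=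
  ((PySem.List.pyGet? bglst 0).getD []).any (fun pref => PySem.Str.isIn pref spec)

lemma pvAssign_get0 (s : String) (b : List (List String)) :
    PySem.List.pyGet? (pvAssign s b) 0 = PySem.List.pyGet? b 0 := by
  match b with
  | [] => rfl
  | [a] => rfl
  | a :: c :: r =>
    have h1 : ((0:Int) ≤ (r.length:Int) + 1) := by positivity
    simp [pvAssign, PySem.List.pyGet?, PySem.List.pyIdx?, h1]

lemma pvM_pvAssign (s : String) (b : List (List String)) : pvM (pvAssign s b) = pvM b := by
  funext t; simp [pvM, pvAssign_get0]

lemma pvAssign_pvAssign (s t : String) (b : List (List String)) :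
    pvAssign t (pvAssign s b) = pvAssign t b := by
  match b with
  | [] => rfl
  | [a] => rfl
  | a :: c :: r => simp [pvAssign, PySem.List.pyGet?, PySem.List.pyIdx?, List.set_set]

-- A's per-group, per-spec update as an if on pvM
lemma pvMatchA_if (s : String) (b : List (List String)) (k : String) :
    (match pvMatchA s b with
     | some _ => (k, pvAssign s b)
     | none => (k, b)) = (k, if pvM b s then pvAssign s b else b) := by
  unfold pvM
  rcases h : pvMatchA s b with _ | p <;> unfold pvMatchA at h
  · have hf : (((PySem.List.pyGet? b 0).getD []).any fun pref => PySem.Str.isIn pref s) = false := by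
      rw [List.any_eq_false]
      exact fun x hx => List.find?_eq_none.mp h x hx
    rw [hf]
    simp
  · have ht : (((PySem.List.pyGet? b 0).getD []).any fun pref => PySem.Str.isIn pref s) = true := by
      rw [List.any_eq_true]
      have hp := List.find?_some h
      exact ⟨p, List.mem_of_find?_eq_some h, hp⟩
    rw [ht]
    simp

-- A's fold over the specs, per group, computes B's "last matching spec" update
lemma pv_group (specs : List String) (b : List (List String)) :
    specs.foldl (fun b' s => if pvM b' s then pvAssign s b' else b') b
      = match specs.reverse.find? (pvM b) with
        | some s => pvAssign s b
        | none => b := by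
  induction specs generalizing b with
  | nil => rfl
  | cons s ss ih =>
    simp only [List.foldl_cons, List.reverse_cons, List.find?_append]
    rw [ih]
    by_cases hm : pvM b s = true
    · simp only [hm, if_true, pvM_pvAssign]
      rcases h : ss.reverse.find? (pvM b) with _ | t
      · simp [List.find?, hm]
      · simp [pvAssign_pvAssign]
    · simp only [hm, Bool.false_eq_true, if_false]
      rcases h : ss.reverse.find? (pvM b) with _ | t
      · simp [List.find?, hm]
      · simp

-- the spec-outer fold of a map over the dict is a map of per-entry folds
lemma pv_fold_map {α : Type} (F : String → α → α) (specs : List String) (d : List α) :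
    specs.foldl (fun d' s => d'.map (F s)) d
      = d.map (fun x => specs.foldl (fun x' s => F s x') x) := by
  induction specs generalizing d with
  | nil => simp
  | cons s ss ih => simp [ih, List.map_map, Function.comp]

lemma pv_fold_pair (specs : List String) (kv : String × List (List String)) :
    specs.foldl (fun kv' s => (kv'.1, if pvM kv'.2 s then pvAssign s kv'.2 else kv'.2)) kv
      = (kv.1, specs.foldl (fun b s => if pvM b s then pvAssign s b else b) kv.2) := by
  induction specs generalizing kv with
  | nil => rfl
  | cons s ss ih => simp [ih]

-- ===== VERDICT (by name: the statement is the Claim_ definition above) =====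
theorem collect_and_fill_spec : Claim_equal_collect_and_fill := by
  intro listOfData dic _ _
  show collect_and_fill listOfData dic = collect_and_fill_alt listOfData dic
  unfold collect_and_fill collect_and_fill_alt
  have hF : (fun (kv : String × List (List String)) s =>
      (match pvMatchA s kv.2 with
       | some _ => (kv.1, pvAssign s kv.2)
       | none => kv))
      = (fun kv s => (kv.1, if pvM kv.2 s then pvAssign s kv.2 else kv.2)) := by
    funext kv s
    have := pvMatchA_if s kv.2 kv.1
    simpa using this
  rw [pv_fold_map (fun s kv => match pvMatchA s kv.2 with
       | some _ => (kv.1, pvAssign s kv.2)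
       | none => kv) listOfData dic]
  refine List.map_congr_left ?_
  intro kv _
  have h1 : listOfData.foldl (fun kv' s =>
      match pvMatchA s kv'.2 with
      | some _ => (kv'.1, pvAssign s kv'.2)
      | none => kv') kv
      = (kv.1, listOfData.foldl (fun b s => if pvM b s then pvAssign s b else b) kv.2) := by
    rw [show (fun (kv' : String × List (List String)) s =>
        match pvMatchA s kv'.2 with
        | some _ => (kv'.1, pvAssign s kv'.2)
        | none => kv') = (fun kv' s => (kv'.1, if pvM kv'.2 s then pvAssign s kv'.2 else kv'.2)) from hF]
    exact pv_fold_pair listOfData kv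
  rw [h1, pv_group]
  show (kv.1, match listOfData.reverse.find? (pvM kv.2) with
        | some s => pvAssign s kv.2
        | none => kv.2)
      = match listOfData.reverse.find? (pvM kv.2) with
        | some spec => (kv.1, pvAssign spec kv.2)
        | none => kv
  rcases h : listOfData.reverse.find? (pvM kv.2) with _ | s <;> rfl
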